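-- pv_equiv track=rewrite | github.com/Longfellow1/Chat_agent | agent_service/domain/trip/clusterer.py | _cluster_by_business_area
-- ===== SOURCE A (Python) =====
-- from typing import List, Dict
--
-- def _cluster_by_business_area(pois: List[Dict]) -> Dict[str, List[Dict]]:
--     """
--     Group POIs by business area.
--
--     Args:
--         pois: List of POI dictionaries
--
--     Returns:
--         Dictionary mapping business_area to list of POIs
--     """
--     clusters = {}
--
--     for poi in pois:
--         area = poi.get("business_area") or poi.get("district") or "其他"
--         if area not in clusters:
--             clusters[area] = []
--         clusters[area].append(poi)
--
--     return clusters
-- ===== SOURCE B (Python) =====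
-- from typing import List, Dict
--
-- def _cluster_by_business_area(pois: List[Dict]) -> Dict[str, List[Dict]]:
--     """Group POIs by business area: dedup the area keys in first-seen order,
--     then build each group with one filter pass per key."""
--     def key(poi):
--         return poi.get("business_area") or poi.get("district") or "其他"
--     keys = dict.fromkeys(key(p) for p in pois)
--     return {k: [p for p in pois if key(p) == k] for k in keys}
-- ===== Notes on version B (the rewrite author's own statement) =====
-- stated objective: alternative
-- what changed: B replaces A's single mutating scan (membership test + per-key append into a growing dict) by a two-phase decomposition: dedup the area keys in first-seen order, then build each group with an independent filter pass over the input per key.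
import Mathlib
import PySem

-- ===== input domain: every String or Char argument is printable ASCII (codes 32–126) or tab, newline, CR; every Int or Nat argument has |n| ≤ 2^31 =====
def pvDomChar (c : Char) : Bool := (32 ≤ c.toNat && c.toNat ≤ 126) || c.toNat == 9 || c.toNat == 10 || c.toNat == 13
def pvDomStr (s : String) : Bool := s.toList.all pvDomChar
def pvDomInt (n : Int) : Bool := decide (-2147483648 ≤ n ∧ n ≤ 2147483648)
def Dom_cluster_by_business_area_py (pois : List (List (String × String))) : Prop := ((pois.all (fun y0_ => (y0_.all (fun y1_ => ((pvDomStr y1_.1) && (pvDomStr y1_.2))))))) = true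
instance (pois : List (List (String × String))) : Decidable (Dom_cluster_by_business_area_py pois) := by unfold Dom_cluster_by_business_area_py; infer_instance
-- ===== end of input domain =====

-- B replaces A's single mutating scan with dedup-the-keys then one filter pass per key; objective: alternative decomposition (same results, no speed claim).

-- ===== PORT A =====
-- poi.get("business_area") or poi.get("district") or "其他"  (Python `or`: empty string and missing key are falsy)
def pvArea (poi : List (String × String)) : String :=
  let step : Option String → String → String := fun o next =>
    match o with
    | some s => if s = "" then next else s
    | none => next
  step ((PySem.Dict.mk poi).get? "business_area")
    (step ((PySem.Dict.mk poi).get? "district") "其他")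

def cluster_by_business_area_py (pois : List (List (String × String))) : List (String × List (List (String × String))) :=
  (pois.foldl
    (fun clusters poi =>
      let area := pvArea poi
      let clusters := if clusters.contains area then clusters
                      else clusters.insert area ([] : List (List (String × String)))
      clusters.modify area [] (fun l => l ++ [poi]))
    PySem.Dict.empty).items

-- ===== PORT B =====
def cluster_by_business_area_py_alt (pois : List (List (String × String))) : List (String × List (List (String × String))) :=
  let keys := PySem.List.dedup (pois.map pvArea)
  keys.map (fun k => (k, pois.filter (fun p => pvArea p == k)))

-- ===== PRECONDITION & SPEC =====
def Spec_cluster_by_business_area_py (pois : List (List (String × String))) (out : List (String × List (List (String × String)))) : Prop := out = cluster_by_business_area_py_alt pois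
instance (pois : List (List (String × String))) (out : List (String × List (List (String × String)))) : Decidable (Spec_cluster_by_business_area_py pois out) := by unfold Spec_cluster_by_business_area_py; infer_instance

-- ===== CLAIM (what is proved, stated in full; the proofs are below) =====
def Claim_equal_cluster_by_business_area_py : Prop := ∀ (pois : List (List (String × String))), Dom_cluster_by_business_area_py pois → Spec_cluster_by_business_area_py pois (cluster_by_business_area_py pois)

-- ===== LEMMAS AND PROOFS =====

-- A's loop body (test-membership, maybe insert [], then append) is exactly `modify area [] (· ++ [poi])`.
theorem pv_step_eq (d : PySem.Dict String (List (List (String × String)))) (poi : List (String × String)) :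
    ((if d.contains (pvArea poi) then d
      else d.insert (pvArea poi) ([] : List (List (String × String)))).modify (pvArea poi) []
        (fun l => l ++ [poi]))
    = d.modify (pvArea poi) [] (fun l => l ++ [poi]) := by
  by_cases h : d.contains (pvArea poi)
  · simp [h]
  · have h' : d.contains (pvArea poi) = false := by simpa using h
    simp only [h', Bool.false_eq_true, if_false, PySem.Dict.modify, PySem.Dict.getD_insert_self,
      PySem.Dict.insert_insert_self, PySem.Dict.getD_of_not_contains _ _ h', List.nil_append]

-- a Dict with unique keys is the map of getD over its keys
theorem pv_items_eq_map_keys (d : PySem.Dict String (List (List (String × String))))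
    (h : d.keys.Nodup) :
    d.items = d.keys.map (fun k => (k, d.getD k [])) := by
  simp only [PySem.Dict.keys, List.map_map]
  conv_lhs => rw [← List.map_id d.items]
  refine (List.map_congr_left ?_).symm
  intro p hp
  have : (p.1, p.2) ∈ d.items := hp
  simp [PySem.Dict.getD_of_mem_items d this h]

-- ===== VERDICT (by name: the statement is the Claim_ definition above) =====
theorem cluster_by_business_area_py_spec : Claim_equal_cluster_by_business_area_py := by
  intro pois _
  unfold Spec_cluster_by_business_area_py cluster_by_business_area_py cluster_by_business_area_py_alt
  simp only [pv_step_eq]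
  rw [← List.foldl_map (f := fun p : List (String × String) => (pvArea p, p))
    (g := fun (d : PySem.Dict String (List (List (String × String)))) q =>
      d.modify q.1 [] (fun l => l ++ [q.2]))]
  have hkeys : (List.foldl (fun (d : PySem.Dict String (List (List (String × String)))) q =>
      d.modify q.1 [] (fun l => l ++ [q.2])) PySem.Dict.empty
      (pois.map (fun p => (pvArea p, p)))).keys = PySem.Set.ofList (pois.map pvArea) := by
    rw [PySem.Dict.keys_foldl_modify_key _ Prod.fst [] (fun _ q => fun l => l ++ [q.2])]
    simp [PySem.Set.update_nil_left, List.map_map, Function.comp_def]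
  rw [pv_items_eq_map_keys _ (by rw [hkeys]; exact PySem.Set.nodup_ofList _), hkeys,
    PySem.List.dedup_eq_ofList]
  refine List.map_congr_left (fun k _ => ?_)
  rw [PySem.Dict.getD_foldl_modify_append, List.filter_map]
  simp [Function.comp_def]
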